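-- pv_equiv track=rewrite | github.com/yuting-chu/Introduction_to_Computers | HW6/hw6_2.py | find_candies_to_crush
-- ===== SOURCE A (Python) =====
-- def find_candies_to_crush(board):
--     to_crush = set()
--     height, width = len(board), len(board[0])
--
--     #找水平方向相連的糖果
--     for i in range(height):
--         for j in range(width - 2):
--             if board[i][j] != 0 and board[i][j] == board[i][j+1] == board[i][j+2]:
--                 to_crush.update([(i, j), (i, j+1), (i, j+2)])
--
--     #找垂直方向相連的糖果
--     for i in range(height - 2):
--         for j in range(width):
--             if board[i][j] != 0 and board[i][j] == board[i+1][j] == board[i+2][j]: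
--                 to_crush.update([(i, j), (i+1, j), (i+2, j)])
--
--     return to_crush
-- ===== SOURCE B (Python) =====
-- def find_candies_to_crush(board):
--     to_crush = set()
--     height, width = len(board), len(board[0])
--
--     # horizontal: one pass per row with a run-length counter; each crushed
--     # cell is added exactly once (triple when the run reaches 3, then one
--     # cell per extension)
--     for i in range(height):
--         run = 1
--         for j in range(1, width):
--             run = run + 1 if board[i][j] == board[i][j - 1] else 1
--             if board[i][j] != 0 and run == 3:
--                 to_crush.add((i, j - 2))
--                 to_crush.add((i, j - 1))
--                 to_crush.add((i, j))
--             elif board[i][j] != 0 and run > 3: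
--                 to_crush.add((i, j))
--
--     # vertical: one sweep over the rows maintaining a run-length counter per
--     # column
--     runs = [1] * width
--     for i in range(1, height):
--         for j in range(width):
--             runs[j] = runs[j] + 1 if board[i][j] == board[i - 1][j] else 1
--             if board[i][j] != 0 and runs[j] == 3:
--                 to_crush.add((i - 2, j))
--                 to_crush.add((i - 1, j))
--                 to_crush.add((i, j))
--             elif board[i][j] != 0 and runs[j] > 3:
--                 to_crush.add((i, j))
--
--     return to_crush
-- ===== Notes on version B (the rewrite author's own statement) =====
-- stated objective: alternative
-- what changed: The sliding-triple window tests with repeated set.update of overlapping triples are replaced by single-pass run-length counters (one scalar counter per row scan, an array of per-column counters for one top-down sweep) that add each crushed cell exactly once: a triple when a run reaches length 3, then one cell per extension.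
-- outside the precondition, e.g. on find_candies_to_crush([[0, 0, 0], [0]]): A returns set(), B raises IndexError
import Mathlib
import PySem

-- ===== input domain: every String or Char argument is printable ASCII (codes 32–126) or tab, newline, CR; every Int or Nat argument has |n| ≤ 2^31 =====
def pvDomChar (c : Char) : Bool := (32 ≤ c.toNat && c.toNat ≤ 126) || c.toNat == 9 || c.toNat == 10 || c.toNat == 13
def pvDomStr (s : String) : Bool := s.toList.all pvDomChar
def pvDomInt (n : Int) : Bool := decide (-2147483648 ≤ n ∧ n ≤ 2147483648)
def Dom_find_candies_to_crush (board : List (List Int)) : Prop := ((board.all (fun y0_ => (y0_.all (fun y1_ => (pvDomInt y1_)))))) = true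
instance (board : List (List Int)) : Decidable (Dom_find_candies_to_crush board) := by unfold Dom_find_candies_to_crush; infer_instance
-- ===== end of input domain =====

-- B replaces A's overlapping sliding-triple tests by run-length counters that add each crushed
-- cell exactly once (alternative decomposition; same asymptotic cost).

-- ===== PORT A =====
def find_candies_to_crush (board : List (List Int)) : List (Int × Int) :=
  let height : Int := board.length
  let width : Int := (PySem.List.pyGetD board 0 []).length
  let s1 : PySem.Set (Int × Int) :=
    (PySem.List.pyRange 0 height 1).foldl (fun s i =>
      (PySem.List.pyRange 0 (width - 2) 1).foldl (fun s j =>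
        if PySem.List.pyGetD (PySem.List.pyGetD board i []) j 0 ≠ 0 ∧
           PySem.List.pyGetD (PySem.List.pyGetD board i []) j 0 =
             PySem.List.pyGetD (PySem.List.pyGetD board i []) (j + 1) 0 ∧
           PySem.List.pyGetD (PySem.List.pyGetD board i []) (j + 1) 0 =
             PySem.List.pyGetD (PySem.List.pyGetD board i []) (j + 2) 0 then
          PySem.Set.update s [(i, j), (i, j + 1), (i, j + 2)]
        else s) s) PySem.Set.empty
  (PySem.List.pyRange 0 (height - 2) 1).foldl (fun s i =>
    (PySem.List.pyRange 0 width 1).foldl (fun s j =>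
      if PySem.List.pyGetD (PySem.List.pyGetD board i []) j 0 ≠ 0 ∧
         PySem.List.pyGetD (PySem.List.pyGetD board i []) j 0 =
           PySem.List.pyGetD (PySem.List.pyGetD board (i + 1) []) j 0 ∧
         PySem.List.pyGetD (PySem.List.pyGetD board (i + 1) []) j 0 =
           PySem.List.pyGetD (PySem.List.pyGetD board (i + 2) []) j 0 then
        PySem.Set.update s [(i, j), (i + 1, j), (i + 2, j)]
      else s) s) s1

-- ===== PORT B =====
def find_candies_to_crush_alt (board : List (List Int)) : List (Int × Int) :=
  let height : Int := board.length
  let width : Int := (PySem.List.pyGetD board 0 []).length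
  -- horizontal: run-length counter per row
  let s1 : PySem.Set (Int × Int) :=
    (PySem.List.pyRange 0 height 1).foldl (fun s i =>
      ((PySem.List.pyRange 1 width 1).foldl (fun (p : PySem.Set (Int × Int) × Int) j =>
        let run : Int :=
          if PySem.List.pyGetD (PySem.List.pyGetD board i []) j 0 =
             PySem.List.pyGetD (PySem.List.pyGetD board i []) (j - 1) 0 then p.2 + 1 else 1
        if PySem.List.pyGetD (PySem.List.pyGetD board i []) j 0 ≠ 0 ∧ run = 3 then
          (PySem.Set.add (PySem.Set.add (PySem.Set.add p.1 (i, j - 2)) (i, j - 1)) (i, j), run)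
        else if PySem.List.pyGetD (PySem.List.pyGetD board i []) j 0 ≠ 0 ∧ run > 3 then
          (PySem.Set.add p.1 (i, j), run)
        else (p.1, run)) (s, 1)).1) PySem.Set.empty
  -- vertical: one sweep down the rows with a list of per-column run counters ([1] * width)
  ((PySem.List.pyRange 1 height 1).foldl (fun (p : PySem.Set (Int × Int) × List Int) i =>
      (PySem.List.pyRange 0 width 1).foldl (fun (p : PySem.Set (Int × Int) × List Int) j =>
        let r : Int :=
          if PySem.List.pyGetD (PySem.List.pyGetD board i []) j 0 =
             PySem.List.pyGetD (PySem.List.pyGetD board (i - 1) []) j 0 then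
            PySem.List.pyGetD p.2 j 0 + 1 else 1
        let runs := PySem.List.pySetD p.2 j r
        if PySem.List.pyGetD (PySem.List.pyGetD board i []) j 0 ≠ 0 ∧ r = 3 then
          (PySem.Set.add (PySem.Set.add (PySem.Set.add p.1 (i - 2, j)) (i - 1, j)) (i, j), runs)
        else if PySem.List.pyGetD (PySem.List.pyGetD board i []) j 0 ≠ 0 ∧ r > 3 then
          (PySem.Set.add p.1 (i, j), runs)
        else (p.1, runs)) p)
    (s1, List.replicate width.toNat (1 : Int))).1

-- ===== PRECONDITION & SPEC =====
-- Pre_ excludes the empty board and boards with a row shorter than the first row (on some of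
-- those, value-dependently, Python A raises IndexError; on the rest — short rows never reached
-- because of zero cells — A returns, but B's single-pass scans read every cell of the declared
-- width and raise IndexError there).
def Pre_find_candies_to_crush (board : List (List Int)) : Prop :=
  board ≠ [] ∧ ∀ r ∈ board, (board.getD 0 []).length ≤ r.length
instance (board : List (List Int)) : Decidable (Pre_find_candies_to_crush board) := by
  unfold Pre_find_candies_to_crush; infer_instance
def pvWitness_find_candies_to_crush : List (List Int) :=
  [[1, 1, 1, 2], [2, 0, 2, 2], [2, 1, 2, 1], [2, 1, 2, 5]]
def Spec_find_candies_to_crush (board : List (List Int)) (out : List (Int × Int)) : Prop := out = find_candies_to_crush_alt board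
instance (board : List (List Int)) (out : List (Int × Int)) : Decidable (Spec_find_candies_to_crush board out) := by unfold Spec_find_candies_to_crush; infer_instance

-- ===== CLAIM (what is proved, stated in full; the proofs are below) =====
def Claim_equal_find_candies_to_crush : Prop := ∀ (board : List (List Int)), Dom_find_candies_to_crush board → Pre_find_candies_to_crush board → Spec_find_candies_to_crush board (find_candies_to_crush board)

-- ===== LEMMAS AND PROOFS =====

def pvH (bd : List (List Int)) : Nat := bd.length
def pvW (bd : List (List Int)) : Nat := (bd.getD 0 []).length
def pvG (bd : List (List Int)) (i j : Nat) : Int := (bd.getD i []).getD j 0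

-- length of the block of equal values ending at column c of row i / at row i of column j
def pvHrun (bd : List (List Int)) (i : Nat) : Nat → Nat
  | 0 => 1
  | c + 1 => if pvG bd i (c + 1) = pvG bd i c then pvHrun bd i c + 1 else 1
def pvVrun (bd : List (List Int)) (j : Nat) : Nat → Nat
  | 0 => 1
  | i + 1 => if pvG bd (i + 1) j = pvG bd i j then pvVrun bd j i + 1 else 1

def pvStepAH (bd : List (List Int)) (i : Nat) (s : PySem.Set (Int × Int)) (t : Nat) :
    PySem.Set (Int × Int) :=
  if pvG bd i t ≠ 0 ∧ pvG bd i t = pvG bd i (t + 1) ∧ pvG bd i (t + 1) = pvG bd i (t + 2) then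
    PySem.Set.add (PySem.Set.add (PySem.Set.add s ((i : Int), (t : Int)))
      ((i : Int), (t : Int) + 1)) ((i : Int), (t : Int) + 2)
  else s
def pvStepAV (bd : List (List Int)) (t : Nat) (s : PySem.Set (Int × Int)) (j : Nat) :
    PySem.Set (Int × Int) :=
  if pvG bd t j ≠ 0 ∧ pvG bd t j = pvG bd (t + 1) j ∧ pvG bd (t + 1) j = pvG bd (t + 2) j then
    PySem.Set.add (PySem.Set.add (PySem.Set.add s ((t : Int), (j : Int)))
      ((t : Int) + 1, (j : Int))) ((t : Int) + 2, (j : Int))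
  else s
def pvStepBH (bd : List (List Int)) (i : Nat) (p : PySem.Set (Int × Int) × Int) (c : Nat) :
    PySem.Set (Int × Int) × Int :=
  let run : Int := if pvG bd i c = pvG bd i (c - 1) then p.2 + 1 else 1
  if pvG bd i c ≠ 0 ∧ run = 3 then
    (PySem.Set.add (PySem.Set.add (PySem.Set.add p.1 ((i : Int), (c : Int) - 2))
      ((i : Int), (c : Int) - 1)) ((i : Int), (c : Int)), run)
  else if pvG bd i c ≠ 0 ∧ run > 3 then (PySem.Set.add p.1 ((i : Int), (c : Int)), run)
  else (p.1, run)
def pvStepBV (bd : List (List Int)) (i : Nat) (p : PySem.Set (Int × Int) × List Int) (j : Nat) :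
    PySem.Set (Int × Int) × List Int :=
  let r : Int := if pvG bd i j = pvG bd (i - 1) j then p.2.getD j 0 + 1 else 1
  let runs := p.2.set j r
  if pvG bd i j ≠ 0 ∧ r = 3 then
    (PySem.Set.add (PySem.Set.add (PySem.Set.add p.1 ((i : Int) - 2, (j : Int)))
      ((i : Int) - 1, (j : Int))) ((i : Int), (j : Int)), runs)
  else if pvG bd i j ≠ 0 ∧ r > 3 then (PySem.Set.add p.1 ((i : Int), (j : Int)), runs)
  else (p.1, runs)

def pvPhaseHA (bd : List (List Int)) (s0 : PySem.Set (Int × Int)) : PySem.Set (Int × Int) :=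
  (List.range (pvH bd)).foldl (fun s i => (List.range (pvW bd - 2)).foldl (pvStepAH bd i) s) s0
def pvPhaseVA (bd : List (List Int)) (s0 : PySem.Set (Int × Int)) : PySem.Set (Int × Int) :=
  (List.range (pvH bd - 2)).foldl (fun s t => (List.range (pvW bd)).foldl (pvStepAV bd t) s) s0
def pvPhaseHB (bd : List (List Int)) (s0 : PySem.Set (Int × Int)) : PySem.Set (Int × Int) :=
  (List.range (pvH bd)).foldl
    (fun s i => ((List.range' 1 (pvW bd - 1)).foldl (pvStepBH bd i) (s, 1)).1) s0
def pvMixed (bd : List (List Int)) (i q : Nat) : List Int :=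
  (List.range (pvW bd)).map
    (fun j => if j < q then (pvVrun bd j i : Int) else (pvVrun bd j (i - 1) : Int))
def pvPhaseVB (bd : List (List Int)) (s0 : PySem.Set (Int × Int)) : PySem.Set (Int × Int) :=
  ((List.range' 1 (pvH bd - 1)).foldl
    (fun p i => (List.range (pvW bd)).foldl (pvStepBV bd i) p)
    (s0, List.replicate (pvW bd) (1 : Int))).1

theorem pv_bridgeAH (bd : List (List Int)) (i t : Nat) (s : PySem.Set (Int × Int)) :
    (if PySem.List.pyGetD (PySem.List.pyGetD bd (0 + (i:Int)) []) (0 + (t:Int)) 0 ≠ 0 ∧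
        PySem.List.pyGetD (PySem.List.pyGetD bd (0 + (i:Int)) []) (0 + (t:Int)) 0 =
          PySem.List.pyGetD (PySem.List.pyGetD bd (0 + (i:Int)) []) (0 + (t:Int) + 1) 0 ∧
        PySem.List.pyGetD (PySem.List.pyGetD bd (0 + (i:Int)) []) (0 + (t:Int) + 1) 0 =
          PySem.List.pyGetD (PySem.List.pyGetD bd (0 + (i:Int)) []) (0 + (t:Int) + 2) 0 then
       PySem.Set.update s [((0 + (i:Int)), (0 + (t:Int))), ((0 + (i:Int)), (0 + (t:Int) + 1)), ((0 + (i:Int)), (0 + (t:Int) + 2))]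
     else s) = pvStepAH bd i s t := by
  have h1 : ((t:Int) + 1) = ((t+1 : Nat) : Int) := by omega
  have h2 : ((t:Int) + 2) = ((t+2 : Nat) : Int) := by omega
  simp only [zero_add, h1, h2, PySem.List.pyGetD_natCast, pvStepAH, pvG]
  rfl

theorem pv_bridgeAV (bd : List (List Int)) (t j : Nat) (s : PySem.Set (Int × Int)) :
    (if PySem.List.pyGetD (PySem.List.pyGetD bd (0 + (t:Int)) []) (0 + (j:Int)) 0 ≠ 0 ∧
        PySem.List.pyGetD (PySem.List.pyGetD bd (0 + (t:Int)) []) (0 + (j:Int)) 0 =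
          PySem.List.pyGetD (PySem.List.pyGetD bd (0 + (t:Int) + 1) []) (0 + (j:Int)) 0 ∧
        PySem.List.pyGetD (PySem.List.pyGetD bd (0 + (t:Int) + 1) []) (0 + (j:Int)) 0 =
          PySem.List.pyGetD (PySem.List.pyGetD bd (0 + (t:Int) + 2) []) (0 + (j:Int)) 0 then
       PySem.Set.update s [((0 + (t:Int)), (0 + (j:Int))), ((0 + (t:Int) + 1), (0 + (j:Int))), ((0 + (t:Int) + 2), (0 + (j:Int)))]
     else s) = pvStepAV bd t s j := by
  have h1 : ((t:Int) + 1) = ((t+1 : Nat) : Int) := by omega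
  have h2 : ((t:Int) + 2) = ((t+2 : Nat) : Int) := by omega
  simp only [zero_add, h1, h2, PySem.List.pyGetD_natCast, pvStepAV, pvG]
  rfl


theorem pv_bridgeBH (bd : List (List Int)) (i k : Nat) (p : PySem.Set (Int × Int) × Int) :
    (let run : Int :=
       if PySem.List.pyGetD (PySem.List.pyGetD bd (0 + (i:Int)) []) (1 + (k:Int)) 0 =
          PySem.List.pyGetD (PySem.List.pyGetD bd (0 + (i:Int)) []) (1 + (k:Int) - 1) 0 then p.2 + 1 else 1
     if PySem.List.pyGetD (PySem.List.pyGetD bd (0 + (i:Int)) []) (1 + (k:Int)) 0 ≠ 0 ∧ run = 3 then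
       (PySem.Set.add (PySem.Set.add (PySem.Set.add p.1 ((0 + (i:Int)), 1 + (k:Int) - 2)) ((0 + (i:Int)), 1 + (k:Int) - 1)) ((0 + (i:Int)), 1 + (k:Int)), run)
     else if PySem.List.pyGetD (PySem.List.pyGetD bd (0 + (i:Int)) []) (1 + (k:Int)) 0 ≠ 0 ∧ run > 3 then
       (PySem.Set.add p.1 ((0 + (i:Int)), 1 + (k:Int)), run)
     else (p.1, run)) = pvStepBH bd i p (1 + k) := by
  have h1 : (1 + (k:Int)) = ((1 + k : Nat) : Int) := by omega
  have h2 : (((1 + k : Nat) : Int) - 1) = ((k : Nat) : Int) := by omega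
  have h3 : (1 + k) - 1 = k := by omega
  simp only [zero_add, h1, h2, PySem.List.pyGetD_natCast, pvStepBH, pvG, h3]

theorem pv_bridgeBV (bd : List (List Int)) (k j : Nat) (p : PySem.Set (Int × Int) × List Int) :
    (let r : Int :=
       if PySem.List.pyGetD (PySem.List.pyGetD bd (1 + (k:Int)) []) (0 + (j:Int)) 0 =
          PySem.List.pyGetD (PySem.List.pyGetD bd (1 + (k:Int) - 1) []) (0 + (j:Int)) 0 then
         PySem.List.pyGetD p.2 (0 + (j:Int)) 0 + 1 else 1
     let runs := PySem.List.pySetD p.2 (0 + (j:Int)) r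
     if PySem.List.pyGetD (PySem.List.pyGetD bd (1 + (k:Int)) []) (0 + (j:Int)) 0 ≠ 0 ∧ r = 3 then
       (PySem.Set.add (PySem.Set.add (PySem.Set.add p.1 (1 + (k:Int) - 2, (0 + (j:Int)))) (1 + (k:Int) - 1, (0 + (j:Int)))) ((1 + (k:Int)), (0 + (j:Int))), runs)
     else if PySem.List.pyGetD (PySem.List.pyGetD bd (1 + (k:Int)) []) (0 + (j:Int)) 0 ≠ 0 ∧ r > 3 then
       (PySem.Set.add p.1 ((1 + (k:Int)), (0 + (j:Int))), runs)
     else (p.1, runs)) = pvStepBV bd (1 + k) p j := by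
  have h1 : (1 + (k:Int)) = ((1 + k : Nat) : Int) := by omega
  have h2 : (((1 + k : Nat) : Int) - 1) = ((k : Nat) : Int) := by omega
  have h3 : (1 + k) - 1 = k := by omega
  simp only [zero_add, h1, h2, PySem.List.pyGetD_natCast, PySem.List.pySetD_natCast]
  simp only [pvStepBV, pvG, h3, h2]

theorem pv_portA_eq (bd : List (List Int)) :
    find_candies_to_crush bd = pvPhaseVA bd (pvPhaseHA bd []) := by
  have hW2 : ((((bd.getD 0 []).length : Int)) - 2).toNat = pvW bd - 2 := by
    simp [pvW]; omega
  have hH2 : (((bd.length : Int)) - 2).toNat = pvH bd - 2 := by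
    simp [pvH]; omega
  simp only [find_candies_to_crush, pvPhaseVA, pvPhaseHA, PySem.List.pyGetD_zero,
    PySem.List.pyRange_one, sub_zero, Int.toNat_natCast, hW2, hH2, List.foldl_map,
    pv_bridgeAH, pv_bridgeAV, pvH, pvW]
  rfl

theorem pv_portB_eq (bd : List (List Int)) :
    find_candies_to_crush_alt bd = pvPhaseVB bd (pvPhaseHB bd []) := by
  have hW1 : ((((bd.getD 0 []).length : Int)) - 1).toNat = pvW bd - 1 := by simp [pvW]
  have hH1 : (((bd.length : Int)) - 1).toNat = pvH bd - 1 := by simp [pvH]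
  simp only [find_candies_to_crush_alt, pvPhaseVB, pvPhaseHB, PySem.List.pyGetD_zero,
    PySem.List.pyRange_one, sub_zero, Int.toNat_natCast, hW1, hH1, List.foldl_map,
    List.range'_eq_map_range, pv_bridgeBH, pv_bridgeBV, pvH, pvW]
  rfl

theorem pvHrun_pos (bd : List (List Int)) (i c : Nat) : 1 ≤ pvHrun bd i c := by
  cases c <;> simp only [pvHrun] <;> try split
  all_goals omega

theorem pvHrun_ge2 (bd : List (List Int)) (i c : Nat) (h : 2 ≤ pvHrun bd i c) :
    1 ≤ c ∧ pvG bd i c = pvG bd i (c - 1) := by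
  cases c with
  | zero => simp [pvHrun] at h
  | succ m =>
    have hs : pvHrun bd i (m + 1)
        = if pvG bd i (m + 1) = pvG bd i m then pvHrun bd i m + 1 else 1 := rfl
    rw [hs] at h
    split at h
    · simpa using ‹pvG bd i (m + 1) = pvG bd i m›
    · omega

-- the single-step equivalence: processing column m+2 on the B side equals processing
-- window m on the A side, provided the cells of the previous window are already present
-- when the run extends
theorem pvStepHKey (bd : List (List Int)) (i m : Nat) (s : PySem.Set (Int × Int))
    (hinv : ∀ u : Nat, u + 3 = m + 2 →
       (pvG bd i u ≠ 0 ∧ pvG bd i u = pvG bd i (u + 1) ∧ pvG bd i (u + 1) = pvG bd i (u + 2)) →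
       ((i : Int), (u : Int)) ∈ s ∧ ((i : Int), (u : Int) + 1) ∈ s ∧ ((i : Int), (u : Int) + 2) ∈ s) :
    pvStepBH bd i (s, (pvHrun bd i (m + 1) : Int)) (m + 2)
      = (pvStepAH bd i s m, (pvHrun bd i (m + 2) : Int)) := by
  have hm1 : m + 2 - 1 = m + 1 := by omega
  have hci2 : ((m + 2 : Nat) : Int) - 2 = (m : Int) := by omega
  have hci1 : ((m + 2 : Nat) : Int) - 1 = (m : Int) + 1 := by omega
  have hci0 : ((m + 2 : Nat) : Int) = (m : Int) + 2 := by omega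
  have hrunB : (if pvG bd i (m + 2) = pvG bd i (m + 1) then (pvHrun bd i (m + 1) : Int) + 1 else 1)
      = (pvHrun bd i (m + 2) : Int) := by
    by_cases h : pvG bd i (m + 2) = pvG bd i (m + 1) <;> simp [pvHrun, h]
  have hp := pvHrun_pos bd i m
  by_cases hv : pvG bd i m ≠ 0 ∧ pvG bd i m = pvG bd i (m + 1) ∧ pvG bd i (m + 1) = pvG bd i (m + 2)
  · have hg2 : pvG bd i (m + 2) ≠ 0 := by rw [← hv.2.2, ← hv.2.1]; exact hv.1
    have hr2 : pvHrun bd i (m + 2) = pvHrun bd i m + 2 := by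
      have e1 : pvHrun bd i (m + 2)
          = if pvG bd i (m + 2) = pvG bd i (m + 1) then pvHrun bd i (m + 1) + 1 else 1 := rfl
      have e2 : pvHrun bd i (m + 1)
          = if pvG bd i (m + 1) = pvG bd i m then pvHrun bd i m + 1 else 1 := rfl
      rw [e1, e2, if_pos hv.2.2.symm, if_pos hv.2.1.symm]
    by_cases h1 : pvHrun bd i m = 1
    · -- the run reaches exactly 3: both sides add the full triple
      have h3 : pvHrun bd i (m + 2) = 3 := by omega
      simp only [pvStepBH, pvStepAH, hm1, hrunB, h3, hci0, if_pos hv]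
      have e1 : ((m:Int) + 2 - 1) = (m:Int) + 1 := by ring
      have e2 : ((m:Int) + 2 - 2) = (m:Int) := by ring
      simp [hg2, e1, e2]
    · -- the run extends: A re-adds the two cells of the previous window
      have h4 : 3 < pvHrun bd i (m + 2) := by omega
      have hprev := pvHrun_ge2 bd i m (by omega)
      obtain ⟨m', rfl⟩ : ∃ m', m = m' + 1 := ⟨m - 1, by omega⟩
      simp only [Nat.add_sub_cancel] at hprev
      have hvprev : pvG bd i m' ≠ 0 ∧ pvG bd i m' = pvG bd i (m' + 1) ∧
          pvG bd i (m' + 1) = pvG bd i (m' + 2) := by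
        refine ⟨?_, hprev.2.symm, hv.2.1⟩
        rw [← hprev.2]
        exact hv.1
      obtain ⟨c0, c1, c2⟩ := hinv m' (by omega) hvprev
      have hc1 : ((i : Int), ((m' + 1 : Nat) : Int)) ∈ s := by
        have : ((m' + 1 : Nat) : Int) = (m' : Int) + 1 := by omega
        rw [this]; exact c1
      have hc2 : ((i : Int), ((m' + 1 : Nat) : Int) + 1) ∈ s := by
        have : ((m' + 1 : Nat) : Int) + 1 = (m' : Int) + 2 := by omega
        rw [this]; exact c2
      simp only [pvStepBH, pvStepAH, hm1, hrunB, hci0, if_pos hv]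
      have hne3 : ¬ ((pvHrun bd i (m' + 1 + 2) : Int) = 3) := by
        intro h; omega
      simp only [hg2, hne3, and_false, if_false, ne_eq, not_false_iff, true_and,
        if_pos (show ((3:Int) < (pvHrun bd i (m' + 1 + 2) : Int)) from by exact_mod_cast h4)]
      rw [PySem.Set.add_of_mem hc1, PySem.Set.add_of_mem hc2]
  · -- invalid window: both sides leave the set unchanged
    have hskip : ¬ (pvG bd i (m + 2) ≠ 0 ∧ 3 ≤ pvHrun bd i (m + 2)) := by
      rintro ⟨hnz, h3⟩
      apply hv
      have e1 : pvHrun bd i (m + 2)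
          = if pvG bd i (m + 2) = pvG bd i (m + 1) then pvHrun bd i (m + 1) + 1 else 1 := rfl
      rw [e1] at h3
      have ha : pvG bd i (m + 2) = pvG bd i (m + 1) := by
        by_contra hne; rw [if_neg hne] at h3; omega
      rw [if_pos ha] at h3
      have hc := pvHrun_ge2 bd i (m + 1) (by omega)
      simp only [Nat.add_sub_cancel] at hc
      refine ⟨?_, hc.2.symm, ha.symm⟩
      rw [hc.2.symm, ha.symm]
      exact hnz
    simp only [pvStepBH, pvStepAH, hm1, hrunB, if_neg hv]
    have hA : ¬ (pvG bd i (m + 2) ≠ 0 ∧ (pvHrun bd i (m + 2) : Int) = 3) := by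
      rintro ⟨a, b⟩; exact hskip ⟨a, by omega⟩
    have hB : ¬ (pvG bd i (m + 2) ≠ 0 ∧ (3:Int) < (pvHrun bd i (m + 2) : Int)) := by
      rintro ⟨a, b⟩; exact hskip ⟨a, by omega⟩
    simp only [if_neg hA]
    rw [if_neg]
    exact fun h => hB ⟨h.1, h.2⟩

theorem pvRowHEquiv (bd : List (List Int)) (i : Nat) : ∀ (n t : Nat) (s : PySem.Set (Int × Int)),
    2 ≤ t →
    (∀ u : Nat, u + 3 = t →
       (pvG bd i u ≠ 0 ∧ pvG bd i u = pvG bd i (u + 1) ∧ pvG bd i (u + 1) = pvG bd i (u + 2)) →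
       ((i : Int), (u : Int)) ∈ s ∧ ((i : Int), (u : Int) + 1) ∈ s ∧ ((i : Int), (u : Int) + 2) ∈ s) →
    (List.range' (t - 2) n).foldl (pvStepAH bd i) s
      = ((List.range' t n).foldl (pvStepBH bd i) (s, (pvHrun bd i (t - 1) : Int))).1 := by
  intro n
  induction n with
  | zero => intro t s _ _; simp
  | succ n ih =>
    intro t s ht hinv
    obtain ⟨m, rfl⟩ : ∃ m, t = m + 2 := ⟨t - 2, by omega⟩
    have hm2 : m + 2 - 2 = m := by omega
    have hm1 : m + 2 - 1 = m + 1 := by omega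
    rw [hm2, hm1, List.range'_succ, List.range'_succ, List.foldl_cons, List.foldl_cons,
        pvStepHKey bd i m s hinv]
    have hinv' : ∀ u : Nat, u + 3 = m + 3 →
        (pvG bd i u ≠ 0 ∧ pvG bd i u = pvG bd i (u + 1) ∧ pvG bd i (u + 1) = pvG bd i (u + 2)) →
        ((i : Int), (u : Int)) ∈ pvStepAH bd i s m ∧ ((i : Int), (u : Int) + 1) ∈ pvStepAH bd i s m ∧
          ((i : Int), (u : Int) + 2) ∈ pvStepAH bd i s m := by
      intro u hu hvu
      have : u = m := by omega
      subst this
      unfold pvStepAH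
      rw [if_pos hvu]
      refine ⟨?_, ?_, ?_⟩ <;> simp [PySem.Set.mem_add]
    have h := ih (m + 3) (pvStepAH bd i s m) (by omega) (by
      intro u hu hvu
      exact hinv' u (by omega) hvu)
    have e2 : m + 3 - 2 = m + 1 := by omega
    have e1 : m + 3 - 1 = m + 2 := by omega
    rw [e2, e1] at h
    exact h

theorem pv_rowH (bd : List (List Int)) (i : Nat) (s : PySem.Set (Int × Int)) :
    (List.range (pvW bd - 2)).foldl (pvStepAH bd i) s
      = ((List.range' 1 (pvW bd - 1)).foldl (pvStepBH bd i) (s, 1)).1 := by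
  by_cases hW : pvW bd ≤ 1
  · have h2 : pvW bd - 2 = 0 := by omega
    have h1 : pvW bd - 1 = 0 := by omega
    simp [h2, h1]
  · have h1 : pvW bd - 1 = (pvW bd - 2) + 1 := by omega
    rw [h1, List.range'_succ, List.foldl_cons]
    have hfirst : pvStepBH bd i (s, 1) 1 = (s, (pvHrun bd i 1 : Int)) := by
      have e0 : pvHrun bd i 1 = if pvG bd i 1 = pvG bd i 0 then 2 else 1 := rfl
      simp only [pvStepBH, e0]
      by_cases h : pvG bd i 1 = pvG bd i 0 <;> norm_num [h]
    rw [hfirst]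
    have h := pvRowHEquiv bd i (pvW bd - 2) 2 s (by omega) (by intro u hu _; omega)
    simpa [List.range_eq_range'] using h

theorem pv_phaseH_eq (bd : List (List Int)) (s0 : PySem.Set (Int × Int)) :
    pvPhaseHA bd s0 = pvPhaseHB bd s0 := by
  unfold pvPhaseHA pvPhaseHB
  have h : (fun (s : PySem.Set (Int × Int)) (i : Nat) =>
        (List.range (pvW bd - 2)).foldl (pvStepAH bd i) s)
      = (fun s i => ((List.range' 1 (pvW bd - 1)).foldl (pvStepBH bd i) (s, 1)).1) := by
    funext s i; exact pv_rowH bd i s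
  rw [h]

theorem pvVrun_pos (bd : List (List Int)) (j i : Nat) : 1 ≤ pvVrun bd j i := by
  cases i <;> simp only [pvVrun] <;> try split
  all_goals omega

theorem pvVrun_le (bd : List (List Int)) (j : Nat) : ∀ i, pvVrun bd j i ≤ i + 1 := by
  intro i
  induction i with
  | zero => simp [pvVrun]
  | succ n ih => simp only [pvVrun]; split <;> omega

theorem pvVrun_ge2 (bd : List (List Int)) (j i : Nat) (h : 2 ≤ pvVrun bd j i) :
    1 ≤ i ∧ pvG bd i j = pvG bd (i - 1) j := by
  cases i with
  | zero => simp [pvVrun] at h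
  | succ m =>
    have hs : pvVrun bd j (m + 1)
        = if pvG bd (m + 1) j = pvG bd m j then pvVrun bd j m + 1 else 1 := rfl
    rw [hs] at h
    split at h
    · simpa using ‹pvG bd (m + 1) j = pvG bd m j›
    · omega

theorem pvMixed_getD (bd : List (List Int)) (i q : Nat) (hq : q < pvW bd) :
    (pvMixed bd i q).getD q 0 = (pvVrun bd q (i - 1) : Int) := by
  rw [pvMixed, List.getD_eq_getElem?_getD]
  simp [hq]

theorem pvMixed_set (bd : List (List Int)) (i q : Nat) :
    (pvMixed bd i q).set q (pvVrun bd q i : Int) = pvMixed bd i (q + 1) := by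
  apply List.ext_getElem
  · simp [pvMixed]
  · intro n h1 h2
    simp only [pvMixed, List.length_map, List.length_range] at h1 h2 ⊢
    rw [List.getElem_set]
    simp only [List.getElem_map, List.getElem_range]
    rcases Nat.lt_trichotomy n q with h | h | h
    · rw [if_neg (by omega)]
      simp only [if_pos h, if_pos (by omega : n < q + 1)]
    · subst h
      rw [if_pos rfl, if_pos (by omega : n < n + 1)]
    · rw [if_neg (by omega), if_neg (by omega), if_neg (by omega)]

theorem pvMixed_succRow (bd : List (List Int)) (i : Nat) :
    pvMixed bd i (pvW bd) = pvMixed bd (i + 1) 0 := by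
  unfold pvMixed
  apply List.map_congr_left
  intro j hj
  simp only [List.mem_range] at hj
  simp [hj]

theorem pvStepVKey (bd : List (List Int)) (m j : Nat) (s : PySem.Set (Int × Int))
    (hj : j < pvW bd)
    (hinv : ∀ u : Nat, u + 3 = m + 2 →
       (pvG bd u j ≠ 0 ∧ pvG bd u j = pvG bd (u + 1) j ∧ pvG bd (u + 1) j = pvG bd (u + 2) j) →
       ((u : Int), (j : Int)) ∈ s ∧ ((u : Int) + 1, (j : Int)) ∈ s ∧ ((u : Int) + 2, (j : Int)) ∈ s) :
    pvStepBV bd (m + 2) (s, pvMixed bd (m + 2) j) j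
      = (pvStepAV bd m s j, pvMixed bd (m + 2) (j + 1)) := by
  have hm1 : m + 2 - 1 = m + 1 := by omega
  have hci2 : ((m + 2 : Nat) : Int) - 2 = (m : Int) := by omega
  have hci1 : ((m + 2 : Nat) : Int) - 1 = (m : Int) + 1 := by omega
  have hci0 : ((m + 2 : Nat) : Int) = (m : Int) + 2 := by omega
  have hget : (pvMixed bd (m + 2) j).getD j 0 = (pvVrun bd j (m + 1) : Int) := by
    rw [pvMixed_getD bd (m + 2) j hj, hm1]
  have hrunB : (if pvG bd (m + 2) j = pvG bd (m + 1) j then (pvVrun bd j (m + 1) : Int) + 1 else 1)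
      = (pvVrun bd j (m + 2) : Int) := by
    by_cases h : pvG bd (m + 2) j = pvG bd (m + 1) j <;> simp [pvVrun, h]
  have hsetr : (pvMixed bd (m + 2) j).set j (pvVrun bd j (m + 2) : Int)
      = pvMixed bd (m + 2) (j + 1) := pvMixed_set bd (m + 2) j
  have hp := pvVrun_pos bd j m
  by_cases hv : pvG bd m j ≠ 0 ∧ pvG bd m j = pvG bd (m + 1) j ∧ pvG bd (m + 1) j = pvG bd (m + 2) j
  · have hg2 : pvG bd (m + 2) j ≠ 0 := by rw [← hv.2.2, ← hv.2.1]; exact hv.1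
    have hr2 : pvVrun bd j (m + 2) = pvVrun bd j m + 2 := by
      have e1 : pvVrun bd j (m + 2)
          = if pvG bd (m + 2) j = pvG bd (m + 1) j then pvVrun bd j (m + 1) + 1 else 1 := rfl
      have e2 : pvVrun bd j (m + 1)
          = if pvG bd (m + 1) j = pvG bd m j then pvVrun bd j m + 1 else 1 := rfl
      rw [e1, e2, if_pos hv.2.2.symm, if_pos hv.2.1.symm]
    by_cases h1 : pvVrun bd j m = 1
    · have h3 : pvVrun bd j (m + 2) = 3 := by omega
      have h3c : ((pvVrun bd j (m + 2) : Int)) = 3 := by exact_mod_cast h3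
      have hsetr3 : (pvMixed bd (m + 2) j).set j (3 : Int) = pvMixed bd (m + 2) (j + 1) := by
        rw [← h3c]; exact hsetr
      simp only [pvStepBV, pvStepAV, hm1, hget, hrunB, h3, hci0, if_pos hv]
      have e1 : ((m : Int) + 2 - 1) = (m : Int) + 1 := by ring
      have e2 : ((m : Int) + 2 - 2) = (m : Int) := by ring
      simp [hg2, e1, e2, hsetr3]
    · have h4 : 3 < pvVrun bd j (m + 2) := by omega
      have hprev := pvVrun_ge2 bd j m (by omega)
      obtain ⟨m', rfl⟩ : ∃ m', m = m' + 1 := ⟨m - 1, by omega⟩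
      simp only [Nat.add_sub_cancel] at hprev
      have hvprev : pvG bd m' j ≠ 0 ∧ pvG bd m' j = pvG bd (m' + 1) j ∧
          pvG bd (m' + 1) j = pvG bd (m' + 2) j := by
        refine ⟨?_, hprev.2.symm, hv.2.1⟩
        rw [← hprev.2]
        exact hv.1
      obtain ⟨c0, c1, c2⟩ := hinv m' (by omega) hvprev
      have hc1 : (((m' + 1 : Nat) : Int), (j : Int)) ∈ s := by
        have e : ((m' + 1 : Nat) : Int) = (m' : Int) + 1 := by omega
        rw [e]; exact c1
      have hc2 : (((m' + 1 : Nat) : Int) + 1, (j : Int)) ∈ s := by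
        have e : ((m' + 1 : Nat) : Int) + 1 = (m' : Int) + 2 := by omega
        rw [e]; exact c2
      simp only [pvStepBV, pvStepAV, hm1, hget, hrunB, hsetr, hci0, if_pos hv]
      have hne3 : ¬ ((pvVrun bd j (m' + 1 + 2) : Int) = 3) := by
        intro h; omega
      simp only [hg2, hne3, and_false, if_false, ne_eq, not_false_iff, true_and,
        if_pos (show ((3:Int) < (pvVrun bd j (m' + 1 + 2) : Int)) from by exact_mod_cast h4)]
      rw [PySem.Set.add_of_mem hc1, PySem.Set.add_of_mem hc2]
  · have hskip : ¬ (pvG bd (m + 2) j ≠ 0 ∧ 3 ≤ pvVrun bd j (m + 2)) := by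
      rintro ⟨hnz, h3⟩
      apply hv
      have e1 : pvVrun bd j (m + 2)
          = if pvG bd (m + 2) j = pvG bd (m + 1) j then pvVrun bd j (m + 1) + 1 else 1 := rfl
      rw [e1] at h3
      have ha : pvG bd (m + 2) j = pvG bd (m + 1) j := by
        by_contra hne; rw [if_neg hne] at h3; omega
      rw [if_pos ha] at h3
      have hc := pvVrun_ge2 bd j (m + 1) (by omega)
      simp only [Nat.add_sub_cancel] at hc
      refine ⟨?_, hc.2.symm, ha.symm⟩
      rw [hc.2.symm, ha.symm]
      exact hnz
    simp only [pvStepBV, pvStepAV, hm1, hget, hrunB, hsetr, if_neg hv]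
    have hA : ¬ (pvG bd (m + 2) j ≠ 0 ∧ (pvVrun bd j (m + 2) : Int) = 3) := by
      rintro ⟨a, b⟩; exact hskip ⟨a, by omega⟩
    have hB : ¬ (pvG bd (m + 2) j ≠ 0 ∧ (3:Int) < (pvVrun bd j (m + 2) : Int)) := by
      rintro ⟨a, b⟩; exact hskip ⟨a, by omega⟩
    simp only [if_neg hA]
    rw [if_neg]
    exact fun h => hB ⟨h.1, h.2⟩

theorem pvStepAV_mono (bd : List (List Int)) (t : Nat) (s : PySem.Set (Int × Int)) (j : Nat)
    (x : Int × Int) (h : x ∈ s) : x ∈ pvStepAV bd t s j := by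
  unfold pvStepAV
  split
  · simp [PySem.Set.mem_add, h]
  · exact h

theorem pvRowVEquiv (bd : List (List Int)) (m : Nat) : ∀ (cnt q : Nat) (s : PySem.Set (Int × Int)),
    q + cnt ≤ pvW bd →
    (∀ u j : Nat, u + 3 = m + 2 → j < pvW bd →
       (pvG bd u j ≠ 0 ∧ pvG bd u j = pvG bd (u + 1) j ∧ pvG bd (u + 1) j = pvG bd (u + 2) j) →
       ((u : Int), (j : Int)) ∈ s ∧ ((u : Int) + 1, (j : Int)) ∈ s ∧ ((u : Int) + 2, (j : Int)) ∈ s) →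
    (List.range' q cnt).foldl (pvStepBV bd (m + 2)) (s, pvMixed bd (m + 2) q)
      = ((List.range' q cnt).foldl (pvStepAV bd m) s, pvMixed bd (m + 2) (q + cnt))
    ∧ (∀ x : Int × Int, x ∈ s → x ∈ (List.range' q cnt).foldl (pvStepAV bd m) s)
    ∧ (∀ j : Nat, q ≤ j → j < q + cnt →
        (pvG bd m j ≠ 0 ∧ pvG bd m j = pvG bd (m + 1) j ∧ pvG bd (m + 1) j = pvG bd (m + 2) j) →
        ((m : Int), (j : Int)) ∈ (List.range' q cnt).foldl (pvStepAV bd m) s ∧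
        ((m : Int) + 1, (j : Int)) ∈ (List.range' q cnt).foldl (pvStepAV bd m) s ∧
        ((m : Int) + 2, (j : Int)) ∈ (List.range' q cnt).foldl (pvStepAV bd m) s) := by
  intro cnt
  induction cnt with
  | zero =>
    intro q s _ _
    refine ⟨by simp, by simp, ?_⟩
    intro j h1 h2
    omega
  | succ n ih =>
    intro q s hle hinv
    have hq : q < pvW bd := by omega
    rw [List.range'_succ, List.foldl_cons, List.foldl_cons,
        pvStepVKey bd m q s hq (fun u hu hvu => hinv u q hu hq hvu)]
    have hinv' : ∀ u j : Nat, u + 3 = m + 2 → j < pvW bd →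
        (pvG bd u j ≠ 0 ∧ pvG bd u j = pvG bd (u + 1) j ∧ pvG bd (u + 1) j = pvG bd (u + 2) j) →
        ((u : Int), (j : Int)) ∈ pvStepAV bd m s q ∧ ((u : Int) + 1, (j : Int)) ∈ pvStepAV bd m s q ∧
          ((u : Int) + 2, (j : Int)) ∈ pvStepAV bd m s q := by
      intro u j hu hj hvu
      obtain ⟨a, b, c⟩ := hinv u j hu hj hvu
      exact ⟨pvStepAV_mono bd m s q _ a, pvStepAV_mono bd m s q _ b, pvStepAV_mono bd m s q _ c⟩
    obtain ⟨heq, hmono, hpost⟩ := ih (q + 1) (pvStepAV bd m s q) (by omega) hinv'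
    refine ⟨by rw [heq]; ring_nf, ?_, ?_⟩
    · intro x hx
      exact hmono x (pvStepAV_mono bd m s q x hx)
    · intro j h1 h2 hvj
      rcases Nat.eq_or_lt_of_le h1 with rfl | h
      · -- j = q : the cells are in the set right after this step
        have hcells : ((m : Int), (q : Int)) ∈ pvStepAV bd m s q ∧
            ((m : Int) + 1, (q : Int)) ∈ pvStepAV bd m s q ∧
            ((m : Int) + 2, (q : Int)) ∈ pvStepAV bd m s q := by
          unfold pvStepAV
          rw [if_pos hvj]
          refine ⟨?_, ?_, ?_⟩ <;> simp [PySem.Set.mem_add]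
        exact ⟨hmono _ hcells.1, hmono _ hcells.2.1, hmono _ hcells.2.2⟩
      · exact hpost j (by omega) (by omega) hvj

theorem pvColsVEquiv (bd : List (List Int)) : ∀ (n i : Nat) (s : PySem.Set (Int × Int)),
    2 ≤ i →
    (∀ u j : Nat, u + 3 = i → j < pvW bd →
       (pvG bd u j ≠ 0 ∧ pvG bd u j = pvG bd (u + 1) j ∧ pvG bd (u + 1) j = pvG bd (u + 2) j) →
       ((u : Int), (j : Int)) ∈ s ∧ ((u : Int) + 1, (j : Int)) ∈ s ∧ ((u : Int) + 2, (j : Int)) ∈ s) →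
    (List.range' (i - 2) n).foldl (fun s t => (List.range (pvW bd)).foldl (pvStepAV bd t) s) s
      = ((List.range' i n).foldl (fun p t => (List.range (pvW bd)).foldl (pvStepBV bd t) p)
          (s, pvMixed bd i 0)).1 := by
  intro n
  induction n with
  | zero => intro i s _ _; simp
  | succ n ih =>
    intro i s hi hinv
    obtain ⟨m, rfl⟩ : ∃ m, i = m + 2 := ⟨i - 2, by omega⟩
    have hm2 : m + 2 - 2 = m := by omega
    rw [hm2, List.range'_succ, List.range'_succ, List.foldl_cons, List.foldl_cons]
    have hWr : List.range (pvW bd) = List.range' 0 (pvW bd) := List.range_eq_range'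
    obtain ⟨heq, _, hpost⟩ := pvRowVEquiv bd m (pvW bd) 0 s (by omega)
      (fun u j hu hj hvu => hinv u j hu hj hvu)
    rw [hWr, heq]
    have hmix : pvMixed bd (m + 2) (0 + pvW bd) = pvMixed bd (m + 3) 0 := by
      rw [Nat.zero_add]
      exact pvMixed_succRow bd (m + 2)
    rw [hmix]
    have h := ih (m + 3)
      ((List.range' 0 (pvW bd)).foldl (pvStepAV bd m) s) (by omega)
      (by
        intro u j hu hj hvu
        have : u = m := by omega
        subst this
        exact hpost j (by omega) (by omega) hvu)
    have e2 : m + 3 - 2 = m + 1 := by omega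
    have e3 : m + 3 = m + 2 + 1 := by omega
    rw [e2, hWr, e3] at h
    exact h

theorem pvRow1V (bd : List (List Int)) : ∀ (cnt q : Nat) (s : PySem.Set (Int × Int)),
    q + cnt ≤ pvW bd →
    (List.range' q cnt).foldl (pvStepBV bd 1) (s, pvMixed bd 1 q) = (s, pvMixed bd 1 (q + cnt)) := by
  intro cnt
  induction cnt with
  | zero => intro q s _; simp
  | succ n ih =>
    intro q s hle
    have hq : q < pvW bd := by omega
    have hget : (pvMixed bd 1 q).getD q 0 = (pvVrun bd q 0 : Int) := pvMixed_getD bd 1 q hq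
    have hstep : pvStepBV bd 1 (s, pvMixed bd 1 q) q = (s, pvMixed bd 1 (q + 1)) := by
      have hrunB : (if pvG bd 1 q = pvG bd 0 q then (pvVrun bd q 0 : Int) + 1 else 1)
          = (pvVrun bd q 1 : Int) := by
        by_cases h : pvG bd 1 q = pvG bd 0 q <;> simp [pvVrun, h]
      have hle2 : pvVrun bd q 1 ≤ 2 := pvVrun_le bd q 1
      have hA : ¬ ((pvVrun bd q 1 : Int) = 3) := by intro h; omega
      have hB : ¬ ((3:Int) < (pvVrun bd q 1 : Int)) := by intro h; omega
      simp only [pvStepBV, Nat.sub_self, hget, hrunB, pvMixed_set bd 1 q]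
      simp [hA, hB]
    rw [List.range'_succ, List.foldl_cons, hstep]
    have h := ih (q + 1) s (by omega)
    rw [h]
    ring_nf

theorem pv_phaseV_eq (bd : List (List Int)) (s0 : PySem.Set (Int × Int)) :
    pvPhaseVA bd s0 = pvPhaseVB bd s0 := by
  unfold pvPhaseVA pvPhaseVB
  by_cases hH : pvH bd ≤ 1
  · have h2 : pvH bd - 2 = 0 := by omega
    have h1 : pvH bd - 1 = 0 := by omega
    simp [h2, h1]
  · have h1 : pvH bd - 1 = (pvH bd - 2) + 1 := by omega
    have hrep : List.replicate (pvW bd) (1 : Int) = pvMixed bd 1 0 := by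
      unfold pvMixed
      have hv : ∀ j : Nat, pvVrun bd j 0 = 1 := fun j => rfl
      simp [hv, List.map_const']
    rw [h1, List.range'_succ, List.foldl_cons, hrep]
    have hWr : List.range (pvW bd) = List.range' 0 (pvW bd) := List.range_eq_range'
    have hHr : List.range (pvH bd - 2) = List.range' 0 (pvH bd - 2) := List.range_eq_range'
    have hrow1 := pvRow1V bd (pvW bd) 0 s0 (by omega)
    have hmix : pvMixed bd 1 (0 + pvW bd) = pvMixed bd 2 0 := by
      rw [Nat.zero_add]; exact pvMixed_succRow bd 1
    rw [hmix] at hrow1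
    rw [hWr, hrow1]
    have h := pvColsVEquiv bd (pvH bd - 2) 2 s0 (by omega) (by intro u j hu _ _; omega)
    rw [hWr] at h
    simpa [hHr] using h

-- ===== VERDICT (by name: the statement is the Claim_ definition above) =====
theorem find_candies_to_crush_spec : Claim_equal_find_candies_to_crush := by
  intro bd _ _
  unfold Spec_find_candies_to_crush
  rw [pv_portA_eq, pv_portB_eq, pv_phaseH_eq, pv_phaseV_eq]
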